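-- pv_equiv track=rewrite | github.com/caixuhong/cncp | fattree_cncp_single_path.py | change_path_to_segment
-- ===== SOURCE A (Python) =====
-- from collections import defaultdict
--
-- def change_path_to_segment(path):
--     segment = defaultdict(list)
--     for subpath in path:
--         for seg in subpath:
--             a, z = seg
--             if z not in segment[a]:
--                 segment[a].append(z)
--     return segment
-- ===== SOURCE B (Python) =====
-- from collections import defaultdict
--
-- def change_path_to_segment(path):
--     # Phase 1: group all endpoints (duplicates included) by source.
--     grouped = defaultdict(list)
--     for subpath in path:
--         for a, z in subpath:
--             grouped[a].append(z)
--     # Phase 2: dedup each group preserving order into a fresh defaultdict.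
--     segment = defaultdict(list)
--     for a, zs in grouped.items():
--         segment[a] = list(dict.fromkeys(zs))
--     return segment
-- ===== Notes on version B (the rewrite author's own statement) =====
-- stated objective: alternative
-- what changed: Replaces A's single nested loop with an inline 'z not in segment[a]' membership check by a two-phase build-then-reduce: first group every endpoint (duplicates kept) by source, then a second pass dedups each group order-preservingly with dict.fromkeys into a fresh defaultdict.
import Mathlib
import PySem

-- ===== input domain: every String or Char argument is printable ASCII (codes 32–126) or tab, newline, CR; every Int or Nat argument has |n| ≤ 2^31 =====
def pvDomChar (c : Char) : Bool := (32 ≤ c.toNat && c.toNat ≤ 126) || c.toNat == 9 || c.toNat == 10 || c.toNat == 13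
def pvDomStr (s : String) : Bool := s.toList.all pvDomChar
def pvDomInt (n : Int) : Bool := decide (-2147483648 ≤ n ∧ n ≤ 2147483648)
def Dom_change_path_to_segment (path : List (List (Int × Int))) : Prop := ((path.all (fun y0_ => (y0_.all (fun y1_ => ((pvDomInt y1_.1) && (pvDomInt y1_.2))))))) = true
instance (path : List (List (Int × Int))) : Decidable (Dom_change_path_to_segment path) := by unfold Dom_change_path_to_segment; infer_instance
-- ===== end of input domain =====

-- B replaces A's single nested loop with inline list-membership dedup by a two-phase
-- build-then-reduce: group all endpoints per source first, then dedup each group with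
-- dict.fromkeys (objective: alternative decomposition; same return value).

-- ===== PORT A =====
def change_path_to_segment (path : List (List (Int × Int))) : List (Int × List Int) :=
  (path.foldl
    (fun segment subpath =>
      subpath.foldl
        (fun segment seg =>
          let a := seg.1
          let z := seg.2
          let cur := segment.getD a []        -- segment[a] (defaultdict: key created with [])
          if cur.contains z then segment
          else segment.insert a (cur ++ [z]))
        segment)
    (PySem.Dict.empty : PySem.Dict Int (List Int))).items

-- ===== PORT B =====
-- port of list(dict.fromkeys(zs))
def dedupKeys (zs : List Int) : List Int :=
  (zs.foldl (fun d z => d.insert z ()) (PySem.Dict.empty : PySem.Dict Int Unit)).keys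

def change_path_to_segment_alt (path : List (List (Int × Int))) : List (Int × List Int) :=
  let grouped :=
    path.foldl
      (fun g subpath =>
        subpath.foldl (fun g seg => g.modify seg.1 [] (fun l => l ++ [seg.2])) g)
      (PySem.Dict.empty : PySem.Dict Int (List Int))
  let segment :=
    grouped.items.foldl
      (fun r q => r.insert q.1 (dedupKeys q.2))
      (PySem.Dict.empty : PySem.Dict Int (List Int))
  segment.items

-- ===== PRECONDITION & SPEC =====
def Spec_change_path_to_segment (path : List (List (Int × Int))) (out : List (Int × List Int)) : Prop := out = change_path_to_segment_alt path
instance (path : List (List (Int × Int))) (out : List (Int × List Int)) : Decidable (Spec_change_path_to_segment path out) := by unfold Spec_change_path_to_segment; infer_instance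

-- ===== CLAIM (what is proved, stated in full; the proofs are below) =====
def Claim_equal_change_path_to_segment : Prop := ∀ (path : List (List (Int × Int))), Dom_change_path_to_segment path → Spec_change_path_to_segment path (change_path_to_segment path)

-- ===== LEMMAS AND PROOFS =====

-- proof-side names for the two loop bodies (definitionally the ports' lambdas)
def stepA (d : PySem.Dict Int (List Int)) (p : Int × Int) : PySem.Dict Int (List Int) :=
  let cur := d.getD p.1 []
  if cur.contains p.2 then d else d.insert p.1 (cur ++ [p.2])

def stepG (g : PySem.Dict Int (List Int)) (p : Int × Int) : PySem.Dict Int (List Int) :=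
  g.modify p.1 [] (fun l => l ++ [p.2])

-- the value-wise relation between A's dict and B's grouped dict
def Fd (p : Int × List Int) : Int × List Int := (p.1, PySem.Set.ofList p.2)

lemma modify_eq_insert (d : PySem.Dict Int (List Int)) (k : Int) (f : List Int → List Int) :
    d.modify k [] f = d.insert k (f (d.getD k [])) :=
  PySem.Dict.ext_iff.mpr rfl

lemma ofList_snoc (gv : List Int) (z : Int) :
    PySem.Set.ofList (gv ++ [z])
      = if z ∈ gv then PySem.Set.ofList gv else PySem.Set.ofList gv ++ [z] := by
  rw [PySem.Set.ofList_append, PySem.Set.update_cons, PySem.Set.update_nil]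
  have hadd : (PySem.Set.ofList gv).add z
      = if (PySem.Set.ofList gv).contains z then PySem.Set.ofList gv
        else PySem.Set.ofList gv ++ [z] := rfl
  rw [hadd]
  by_cases hz : z ∈ gv
  · simp [PySem.Set.mem_ofList, hz]
  · simp [PySem.Set.mem_ofList, hz]

lemma keys_eq_of_items_map (d g : PySem.Dict Int (List Int))
    (h : d.items = g.items.map Fd) : d.keys = g.keys := by
  simp only [PySem.Dict.keys, h, List.map_map]
  rfl

lemma getD_rel (d g : PySem.Dict Int (List Int)) (hnd : g.keys.Nodup)
    (h : d.items = g.items.map Fd) (a : Int) :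
    d.getD a [] = PySem.Set.ofList (g.getD a []) := by
  have hk := keys_eq_of_items_map d g h
  by_cases hc : g.contains a = true
  · rcases (PySem.Dict.contains_iff_mem_keys g a).mp hc with hmem
    have : ∃ v, (a, v) ∈ g.items := by
      simp only [PySem.Dict.keys, List.mem_map] at hmem
      rcases hmem with ⟨p, hp, hp1⟩
      exact ⟨p.2, by simpa [← hp1] using hp⟩
    rcases this with ⟨v, hv⟩
    have hgv := PySem.Dict.getD_of_mem_items g hv hnd []
    have hdv : (a, PySem.Set.ofList v) ∈ d.items := by
      rw [h]; exact List.mem_map.mpr ⟨(a, v), hv, rfl⟩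
    have hdnd : d.keys.Nodup := hk ▸ hnd
    have := PySem.Dict.getD_of_mem_items d hdv hdnd []
    rw [this, hgv]
  · have hcb : g.contains a = false := by
      cases hcb : g.contains a
      · rfl
      · exact absurd hcb hc
    have hdc : d.contains a = false := by
      rw [PySem.Dict.contains_eq_decide_mem_keys, hk,
        ← PySem.Dict.contains_eq_decide_mem_keys]
      exact hcb
    rw [PySem.Dict.getD_of_not_contains d [] hdc,
      PySem.Dict.getD_of_not_contains g [] hcb]
    rfl

lemma stepsRel (L : List (Int × Int)) :
    ∀ (d g : PySem.Dict Int (List Int)), g.keys.Nodup →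
      d.items = g.items.map Fd →
      (L.foldl stepA d).items = (L.foldl stepG g).items.map Fd := by
  induction L with
  | nil => intro d g _ h; simpa using h
  | cons p L ih =>
    intro d g hnd h
    obtain ⟨a, z⟩ := p
    have hk := keys_eq_of_items_map d g h
    have hcont : ∀ k, d.contains k = g.contains k := by
      intro k
      rw [PySem.Dict.contains_eq_decide_mem_keys, hk,
        ← PySem.Dict.contains_eq_decide_mem_keys]
    have hgetD := getD_rel d g hnd h a
    set gv := g.getD a [] with hgv
    have hGstep : stepG g (a, z) = g.insert a (gv ++ [z]) := by
      unfold stepG; exact modify_eq_insert g a _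
    have hndG : (stepG g (a, z)).keys.Nodup := by
      rw [hGstep]; exact PySem.Dict.nodup_keys_insert g a _ hnd
    simp only [List.foldl_cons]
    by_cases hz : z ∈ gv
    · -- duplicate endpoint: A keeps its dict, B appends a duplicate that dedup removes
      have hc : g.contains a = true := by
        by_contra hcf
        have : g.contains a = false := by
          cases hcb : g.contains a
          · rfl
          · exact absurd hcb hcf
        rw [PySem.Dict.getD_of_not_contains g [] this] at hgv
        rw [hgv] at hz
        exact absurd hz (List.not_mem_nil)
      have hA : stepA d (a, z) = d := by
        simp [stepA, hgetD, PySem.Set.mem_ofList, hz]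
      rw [hA]
      apply ih _ _ hndG
      rw [hGstep, PySem.Dict.items_insert_of_contains g _ hc, h, List.map_map]
      apply List.map_congr_left
      intro q hq
      by_cases hqa : q.1 = a
      · have hq2 : q.2 = gv := by
          have hmem : (a, q.2) ∈ g.items := by
            rw [← hqa]; exact (by simpa using hq)
          have := PySem.Dict.getD_of_mem_items g hmem hnd []
          rw [← hgv] at this
          exact this.symm
        simp [Function.comp_apply, Fd, hqa, hq2, ofList_snoc, hz]
      · simp [Function.comp_apply, Fd, hqa]
    · -- new endpoint: both sides append it at the same position
      have hA : stepA d (a, z) = d.insert a (PySem.Set.ofList gv ++ [z]) := by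
        simp [stepA, hgetD, PySem.Set.mem_ofList, hz]
      rw [hA]
      apply ih _ _ hndG
      rw [hGstep]
      by_cases hc : g.contains a = true
      · have hdc : d.contains a = true := by rw [hcont a]; exact hc
        rw [PySem.Dict.items_insert_of_contains g _ hc,
          PySem.Dict.items_insert_of_contains d _ hdc, h, List.map_map, List.map_map]
        apply List.map_congr_left
        intro q _
        by_cases hqa : q.1 = a
        · simp [Function.comp_apply, Fd, hqa, ofList_snoc, hz]
        · simp [Function.comp_apply, Fd, hqa]
      · have hcb : g.contains a = false := by
          cases hcb : g.contains a
          · rfl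
          · exact absurd hcb hc
        have hdc : d.contains a = false := by rw [hcont a]; exact hcb
        rw [PySem.Dict.items_insert_of_not_contains g _ hcb,
          PySem.Dict.items_insert_of_not_contains d _ hdc, h, List.map_append]
        simp [Fd, ofList_snoc, hz]

lemma dedupKeys_eq_ofList (zs : List Int) : dedupKeys zs = PySem.Set.ofList zs := by
  unfold dedupKeys
  rw [PySem.Dict.keys_foldl_insert zs (fun _ _ => ()) PySem.Dict.empty,
    PySem.Dict.keys_empty, PySem.Set.update_nil_left]

lemma portA_eq (path : List (List (Int × Int))) :
    change_path_to_segment path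
      = (path.flatten.foldl stepA PySem.Dict.empty).items := by
  show (path.foldl (fun s sub => List.foldl stepA s sub) PySem.Dict.empty).items = _
  rw [← List.foldl_flatten (f := stepA)]

lemma portB_eq (path : List (List (Int × Int))) :
    change_path_to_segment_alt path
      = ((path.flatten.foldl stepG PySem.Dict.empty).items.foldl
          (fun r q => r.insert q.1 (dedupKeys q.2)) PySem.Dict.empty).items := by
  show ((path.foldl (fun g sub => List.foldl stepG g sub) PySem.Dict.empty).items.foldl
          (fun r q => r.insert q.1 (dedupKeys q.2)) PySem.Dict.empty).items = _
  rw [← List.foldl_flatten (f := stepG)]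

-- ===== VERDICT (by name: the statement is the Claim_ definition above) =====
theorem change_path_to_segment_spec : Claim_equal_change_path_to_segment := by
  unfold Claim_equal_change_path_to_segment
  intro path _
  unfold Spec_change_path_to_segment
  rw [portA_eq, portB_eq]
  set L := path.flatten with hL
  have hnd : (L.foldl stepG PySem.Dict.empty).keys.Nodup := by
    exact PySem.Dict.nodup_keys_foldl_modify_key L (fun x => x.1) []
      (fun _ x l => l ++ [x.2]) PySem.Dict.empty (by simp [PySem.Dict.keys_empty])
  have hrel := stepsRel L PySem.Dict.empty PySem.Dict.empty
    (by simp [PySem.Dict.keys_empty]) (by rfl)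
  set grouped := L.foldl stepG PySem.Dict.empty with hg
  have hfresh : ∀ q ∈ grouped.items,
      (PySem.Dict.empty : PySem.Dict Int (List Int)).contains q.1 = false := by
    intro q _; exact PySem.Dict.contains_empty q.1
  have hndfst : (grouped.items.map (fun q => q.1)).Nodup := by
    simpa [PySem.Dict.keys] using hnd
  have hitems := PySem.Dict.items_foldl_insert_fresh grouped.items
    (fun q => q.1) (fun q => dedupKeys q.2) PySem.Dict.empty hfresh hndfst
  rw [hrel]
  rw [show (grouped.items.foldl (fun r q => r.insert q.1 (dedupKeys q.2))
      (PySem.Dict.empty : PySem.Dict Int (List Int))).items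
      = PySem.Dict.empty.items ++ grouped.items.map (fun q => (q.1, dedupKeys q.2))
    from hitems]
  have : (PySem.Dict.empty : PySem.Dict Int (List Int)).items = [] := rfl
  rw [this, List.nil_append]
  apply List.map_congr_left
  intro q _
  simp [Fd, dedupKeys_eq_ofList]
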